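-- pv_equiv track=rewrite | github.com/hyskoniho/evoAlg-scheduling | scripts/fitting/fitting_function.py | validar_sobreposicoes
-- ===== SOURCE A (Python) =====
-- def separar_dias(turma: str) -> list[list[str]]:
--     """ Separa a turma em dias
--
--     Args:
--         turma (str): Horário de uma turma
--
--     Returns:
--         list[list[str]]: Lista de horários separados por dia
--     """
--     dias: list[list[str]] = [['' for _ in range(6)] for _ in range(5)]
--
--     for i, aula in enumerate(turma):
--         dias[i // 6][i % 6] = aula
--
--     return [''.join(dia) for dia in dias]
--
-- def validar_sobreposicoes(strings: list[str]) -> int: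
--     strings = [string.replace('T', 'M').replace('F', 'M')\
--                 .replace('G', 'H')\
--                 .replace('A', 'U') for string in strings]
--
--     chars = set(list(''.join(strings)))
--     positions = {char: {num: {} for num in range(5)} for char in chars}
--     nota_sobreposicoes: int = 0
--
--     for i, turma in enumerate(strings):
--         for j, dia in enumerate(separar_dias(turma)):
--             for k, aula in enumerate(dia):
--                 if positions[aula][j] and k not in positions[aula][j]:
--                     positions[aula][j].add(k)
--                 elif positions[aula][j] and k in positions[aula][j]:
--                     nota_sobreposicoes += 1
--                 else:
--                     positions[aula][j] = {k}
--
--     return nota_sobreposicoes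
-- ===== SOURCE B (Python) =====
-- def separar_dias(turma: str) -> list[list[str]]:
--     dias: list[list[str]] = [['' for _ in range(6)] for _ in range(5)]
--     for i, aula in enumerate(turma):
--         dias[i // 6][i % 6] = aula
--     return [''.join(dia) for dia in dias]
--
-- def validar_sobreposicoes(strings: list[str]) -> int:
--     strings = [string.replace('T', 'M').replace('F', 'M')\
--                 .replace('G', 'H')\
--                 .replace('A', 'U') for string in strings]
--     triples = [(aula, j, k)
--                for turma in strings
--                for j, dia in enumerate(separar_dias(turma))
--                for k, aula in enumerate(dia)]
--     return len(triples) - len(set(triples))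
-- ===== Notes on version B (the rewrite author's own statement) =====
-- stated objective: simpler
-- what changed: Replaces A's incremental dict-of-sets with three-way branch logic by materialising the flat list of (aula, day, slot) triples in one comprehension and returning len(triples) - len(set(triples)), i.e. total minus distinct.
import Mathlib
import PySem

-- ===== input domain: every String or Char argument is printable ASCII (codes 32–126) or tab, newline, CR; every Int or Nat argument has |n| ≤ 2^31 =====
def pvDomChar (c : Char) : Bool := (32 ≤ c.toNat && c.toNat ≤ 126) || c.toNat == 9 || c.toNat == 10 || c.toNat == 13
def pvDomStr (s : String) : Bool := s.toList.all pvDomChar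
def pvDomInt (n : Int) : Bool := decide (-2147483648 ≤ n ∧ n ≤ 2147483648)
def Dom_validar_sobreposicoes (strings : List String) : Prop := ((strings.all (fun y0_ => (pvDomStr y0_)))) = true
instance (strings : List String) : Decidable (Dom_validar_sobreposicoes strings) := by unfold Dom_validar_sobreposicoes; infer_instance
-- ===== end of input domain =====

-- B replaces A's incremental dict-of-sets bookkeeping with a flat triple list and
-- returns total minus distinct; objective: simpler.

-- ===== PORT A =====

-- the four chained str.replace calls (shared by both sources verbatim)
def pvRepl (s : String) : String :=
  PySem.Str.replace (PySem.Str.replace (PySem.Str.replace (PySem.Str.replace s "T" "M") "F" "M") "G" "H") "A" "U"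

-- separar_dias: dias[i//6][i%6] = aula then join each day.  pySetD/pyGetD are the
-- total forms of Python's indexing; exact whenever i < 30 (Pre_ excludes longer turmas,
-- where Python raises IndexError).
def separar_dias (turma : String) : List String :=
  let dias : List (List String) := List.replicate 5 (List.replicate 6 "")
  let dias := (PySem.List.enumerate turma.toList 0).foldl
    (fun ds p =>
      PySem.List.pySetD ds (PySem.Int.floordiv p.1 6)
        (PySem.List.pySetD (PySem.List.pyGetD ds (PySem.Int.floordiv p.1 6) [])
          (PySem.Int.mod p.1 6) (String.ofList [p.2]))) dias
  dias.map (fun dia => PySem.Str.join "" dia)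

-- the inner-dict literal {num: {} for num in range(5)} (Python's empty {} plays the
-- role of an empty set; both are modelled as the empty list, tested only for truthiness)
def pvInner0 : PySem.Dict Int (List Int) :=
  (PySem.List.pyRange 0 5 1).foldl (fun d2 n => d2.insert n ([] : List Int)) PySem.Dict.empty

-- A's loop body for one slot (aula, j, k); functional update replaces Python's
-- in-place mutation of positions[aula][j]
def pvStepA (st : PySem.Dict Char (PySem.Dict Int (List Int)) × Int)
    (t : Char × Int × Int) : PySem.Dict Char (PySem.Dict Int (List Int)) × Int :=
  let pos := st.1
  let nota := st.2
  let s := (pos.getD t.1 PySem.Dict.empty).getD t.2.1 []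
  if s ≠ [] ∧ t.2.2 ∉ s then
    (pos.insert t.1 ((pos.getD t.1 PySem.Dict.empty).insert t.2.1 (PySem.Set.add s t.2.2)), nota)
  else if s ≠ [] ∧ t.2.2 ∈ s then
    (pos, nota + 1)
  else
    (pos.insert t.1 ((pos.getD t.1 PySem.Dict.empty).insert t.2.1 (PySem.Set.ofList [t.2.2])), nota)

def validar_sobreposicoes (strings : List String) : Int :=
  let strings := strings.map pvRepl
  let chars : PySem.Set Char := PySem.Set.ofList (PySem.Str.join "" strings).toList
  let positions : PySem.Dict Char (PySem.Dict Int (List Int)) :=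
    chars.foldl (fun d c => d.insert c pvInner0) PySem.Dict.empty
  let res := (PySem.List.enumerate strings 0).foldl (fun st p =>
      (PySem.List.enumerate (separar_dias p.2) 0).foldl (fun st q =>
        (PySem.List.enumerate q.2.toList 0).foldl (fun st r =>
          pvStepA st (r.2, q.1, r.1)) st) st) (positions, (0 : Int))
  res.2

-- ===== PORT B =====

-- the flat triple comprehension of Source B
def pvTriples (strings : List String) : List (Char × Int × Int) :=
  strings.flatMap (fun turma =>
    (PySem.List.enumerate (separar_dias turma) 0).flatMap (fun q =>
      (PySem.List.enumerate q.2.toList 0).map (fun r => (r.2, q.1, r.1))))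

def validar_sobreposicoes_alt (strings : List String) : Int :=
  let strings := strings.map pvRepl
  let triples := pvTriples strings
  (triples.length : Int) - ((PySem.Set.ofList triples).length : Int)

-- ===== PRECONDITION & SPEC =====
-- Pre_: Python's separar_dias raises IndexError (dias[i//6] with i//6 ≥ 5) for any
-- schedule string longer than 30 characters, in A and in B alike; nothing else raises.
def Pre_validar_sobreposicoes (strings : List String) : Prop :=
  ∀ s ∈ strings, s.toList.length ≤ 30
instance (strings : List String) : Decidable (Pre_validar_sobreposicoes strings) := by
  unfold Pre_validar_sobreposicoes; infer_instance

def pvWitness_validar_sobreposicoes : List String := ["MMHUXX", "TFGAXX"]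

def Spec_validar_sobreposicoes (strings : List String) (out : Int) : Prop := out = validar_sobreposicoes_alt strings
instance (strings : List String) (out : Int) : Decidable (Spec_validar_sobreposicoes strings out) := by unfold Spec_validar_sobreposicoes; infer_instance

-- ===== CLAIM (what is proved, stated in full; the proofs are below) =====
def Claim_equal_validar_sobreposicoes : Prop := ∀ (strings : List String), Dom_validar_sobreposicoes strings → Pre_validar_sobreposicoes strings → Spec_validar_sobreposicoes strings (validar_sobreposicoes strings)

-- ===== LEMMAS AND PROOFS =====

theorem pvWitness_ok :
    Dom_validar_sobreposicoes pvWitness_validar_sobreposicoes ∧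
    Pre_validar_sobreposicoes pvWitness_validar_sobreposicoes := by decide

-- the inner starting dict maps every key to the empty list
theorem pvInner0_getD (j : Int) : pvInner0.getD j [] = [] := by
  have h : pvInner0 = PySem.Dict.mk [(0, []), (1, []), (2, []), (3, []), (4, [])] := by rfl
  rw [h]
  simp [PySem.Dict.getD, PySem.Dict.get?_mk_cons]
  split_ifs <;> rfl

-- the initial positions dict has every slot-set empty
theorem pvInit_getD (cs : List Char) :
    ∀ (d : PySem.Dict Char (PySem.Dict Int (List Int))),
      (∀ a j, ((d.getD a PySem.Dict.empty).getD j ([] : List Int)) = []) →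
      ∀ a j, (((cs.foldl (fun d c => d.insert c pvInner0) d).getD a PySem.Dict.empty).getD j
        ([] : List Int)) = [] := by
  induction cs with
  | nil => intro d h; exact h
  | cons c cs ih =>
    intro d h
    refine ih _ ?_
    intro a j
    rw [PySem.Dict.getD_insert]
    split_ifs with hac
    · exact pvInner0_getD j
    · exact h a j

-- invariant of A's slot loop: nota counts exactly the repeated triples
theorem pvLoop_inv (L : List (Char × Int × Int)) :
    ∀ (pos : PySem.Dict Char (PySem.Dict Int (List Int))) (nota : Int)
      (S : List (Char × Int × Int)),
      (∀ a j k, k ∈ (pos.getD a PySem.Dict.empty).getD j ([] : List Int) ↔ (a, j, k) ∈ S) →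
      (L.foldl pvStepA (pos, nota)).2
        = nota + (L.length : Int) - (((PySem.Set.update S L).length : Int) - (S.length : Int)) := by
  induction L with
  | nil => intro pos nota S h; simp [PySem.Set.update_nil]
  | cons x rest ih =>
    intro pos nota S h
    obtain ⟨a, j, k⟩ := x
    have hs := h a j k
    by_cases hmem : (a, j, k) ∈ S
    · -- already seen: branch two fires, nota increments, state unchanged
      have hk : k ∈ (pos.getD a PySem.Dict.empty).getD j ([] : List Int) := hs.mpr hmem
      have hne : (pos.getD a PySem.Dict.empty).getD j ([] : List Int) ≠ [] := by
        intro hnil; rw [hnil] at hk; exact (List.not_mem_nil) hk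
      have hstep : pvStepA (pos, nota) (a, j, k) = (pos, nota + 1) := by
        simp only [pvStepA]
        rw [if_neg (by simp [hk]), if_pos ⟨hne, hk⟩]
      rw [List.foldl_cons, hstep, ih pos (nota + 1) S h]
      have hupd : PySem.Set.update S ((a, j, k) :: rest) = PySem.Set.update S rest := by
        rw [PySem.Set.update_cons]
        congr 1
        simp [PySem.Set.add, hmem]
      rw [hupd]
      simp only [List.length_cons]
      push_cast
      omega
    · -- new triple: the slot-set gains k, nota unchanged
      have hk : k ∉ (pos.getD a PySem.Dict.empty).getD j ([] : List Int) := fun hc => hmem (hs.mp hc)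
      have hstep : pvStepA (pos, nota) (a, j, k) =
          (pos.insert a ((pos.getD a PySem.Dict.empty).insert j
            (PySem.Set.add ((pos.getD a PySem.Dict.empty).getD j []) k)), nota) := by
        simp only [pvStepA]
        by_cases hnil : (pos.getD a PySem.Dict.empty).getD j ([] : List Int) = []
        · rw [if_neg (by simp [hnil]), if_neg (by simp [hnil]), hnil]
          rfl
        · rw [if_pos ⟨hnil, hk⟩]
      rw [List.foldl_cons, hstep]
      have h' : ∀ a' j' k',
          k' ∈ ((pos.insert a ((pos.getD a PySem.Dict.empty).insert j
              (PySem.Set.add ((pos.getD a PySem.Dict.empty).getD j []) k))).getD a'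
              PySem.Dict.empty).getD j' ([] : List Int)
            ↔ (a', j', k') ∈ S ++ [(a, j, k)] := by
        intro a' j' k'
        rw [PySem.Dict.getD_insert]
        split_ifs with ha
        · subst ha
          rw [PySem.Dict.getD_insert]
          split_ifs with hj
          · subst hj
            rw [PySem.Set.mem_add, h a' j' k']
            simp only [List.mem_append, List.mem_singleton, Prod.ext_iff]
            tauto
          · rw [h a' j' k']
            simp only [List.mem_append, List.mem_singleton, Prod.ext_iff]
            constructor
            · exact Or.inl
            · rintro (hin | ⟨_, hje, _⟩)
              · exact hin
              · exact absurd hje hj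
        · rw [h a' j' k']
          simp only [List.mem_append, List.mem_singleton, Prod.ext_iff]
          constructor
          · exact Or.inl
          · rintro (hin | ⟨hae, _, _⟩)
            · exact hin
            · exact absurd hae ha
      rw [ih _ nota (S ++ [(a, j, k)]) h']
      have hadd : PySem.Set.add S (a, j, k) = S ++ [(a, j, k)] := by
        simp [PySem.Set.add, hmem]
      have hupd : PySem.Set.update S ((a, j, k) :: rest)
          = PySem.Set.update (S ++ [(a, j, k)]) rest := by
        rw [PySem.Set.update_cons, hadd]
      rw [hupd]
      simp only [List.length_append, List.length_cons, List.length_nil]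
      push_cast
      omega

-- A's three nested enumerate loops are the fold of pvStepA over B's flat triple list
theorem pvFold_triples (ss : List String)
    (st : PySem.Dict Char (PySem.Dict Int (List Int)) × Int) :
    (PySem.List.enumerate ss 0).foldl (fun st p =>
      (PySem.List.enumerate (separar_dias p.2) 0).foldl (fun st q =>
        (PySem.List.enumerate q.2.toList 0).foldl (fun st r =>
          pvStepA st (r.2, q.1, r.1)) st) st) st
    = (pvTriples ss).foldl pvStepA st := by
  have houter : (PySem.List.enumerate ss 0).foldl (fun st p =>
      (PySem.List.enumerate (separar_dias p.2) 0).foldl (fun st q =>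
        (PySem.List.enumerate q.2.toList 0).foldl (fun st r =>
          pvStepA st (r.2, q.1, r.1)) st) st) st
      = ss.foldl (fun st t =>
        (PySem.List.enumerate (separar_dias t) 0).foldl (fun st q =>
          (PySem.List.enumerate q.2.toList 0).foldl (fun st r =>
            pvStepA st (r.2, q.1, r.1)) st) st) st := by
    conv_rhs => rw [← PySem.List.map_snd_enumerate ss 0, List.foldl_map]
  rw [houter, pvTriples, List.foldl_flatMap]
  congr 1
  funext st t
  rw [List.foldl_flatMap]
  congr 1
  funext st q
  rw [List.foldl_map]

-- ===== VERDICT (by name: the statement is the Claim_ definition above) =====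
theorem validar_sobreposicoes_spec : Claim_equal_validar_sobreposicoes := by
  intro strings _ _
  unfold Spec_validar_sobreposicoes validar_sobreposicoes validar_sobreposicoes_alt
  simp only []
  rw [pvFold_triples]
  have hinit := pvInit_getD ((PySem.Set.ofList (PySem.Str.join "" (strings.map pvRepl)).toList : PySem.Set Char))
    PySem.Dict.empty (by
      intro a j
      rfl)
  have h0 : ∀ a j k, k ∈ ((((PySem.Set.ofList (PySem.Str.join "" (strings.map pvRepl)).toList : PySem.Set Char)).foldl
      (fun d c => d.insert c pvInner0) PySem.Dict.empty).getD a PySem.Dict.empty).getD j ([] : List Int)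
      ↔ (a, j, k) ∈ ([] : List (Char × Int × Int)) := by
    intro a j k
    rw [hinit a j]
    simp
  rw [pvLoop_inv (pvTriples (strings.map pvRepl)) _ 0 [] h0]
  rw [PySem.Set.update_nil_left]
  simp
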